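-- pv_equiv track=rewrite | github.com/npbool/AdCheater | convertRe.py | convPlain
-- ===== SOURCE A (Python) =====
-- def convPlain(rule):
--     reExpr = ""
--     for c in rule:
--         if c=='^':
--             reExpr += r"([/:?=&]|//)"
--         elif c=='*':
--             reExpr += r".*"
--         elif c=='.':
--             reExpr += r'\.'
--         elif c=='?':
--             reExpr += r'\?'
--         elif c=='+':
--             reExpr += r'\+'
--         elif c=='[':
--             reExpr += r'\['
--         elif c=='|':
--             reExpr += r'\|'
--         else:
--             reExpr += c
--     return reExpr
-- ===== SOURCE B (Python) =====
-- SPECIALS = [('^', r"([/:?=&]|//)"), ('*', r".*"), ('.', r"\."),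
--             ('?', r"\?"), ('+', r"\+"), ('[', r"\["), ('|', r"\|")]
--
--
-- def convPlain(rule):
--     # Staged passes: split on each special character in turn, recurse into
--     # the fragments for the remaining specials, and glue the fragments back
--     # with the regex replacement.  Fragments never contain characters of
--     # earlier stages, and replacements are inserted after all deeper
--     # splitting, so they are never re-scanned.
--     def go(s, specials):
--         if not specials:
--             return s
--         (ch, repl), rest = specials[0], specials[1:]
--         return repl.join(go(part, rest) for part in s.split(ch))
--     return go(rule, SPECIALS)
-- ===== Notes on version B (the rewrite author's own statement) =====
-- stated objective: alternative
-- what changed: Replaces the single character-by-character loop with an if/elif ladder by a staged divide-and-conquer: recurse over the list of special characters, split the string on the current special and rejoin the recursively converted fragments with its regex replacement.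
import Mathlib
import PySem

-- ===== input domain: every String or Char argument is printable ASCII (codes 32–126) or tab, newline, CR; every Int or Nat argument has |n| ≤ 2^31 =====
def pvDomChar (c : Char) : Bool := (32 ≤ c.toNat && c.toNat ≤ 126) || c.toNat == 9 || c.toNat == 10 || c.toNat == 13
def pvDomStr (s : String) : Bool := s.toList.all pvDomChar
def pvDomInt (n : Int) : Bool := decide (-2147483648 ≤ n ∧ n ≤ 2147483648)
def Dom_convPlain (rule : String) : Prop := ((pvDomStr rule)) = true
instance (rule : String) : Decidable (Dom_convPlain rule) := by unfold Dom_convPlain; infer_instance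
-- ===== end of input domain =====

-- B replaces A's single character loop with its if/elif ladder by staged passes:
-- recursion over the list of special characters, splitting on each and rejoining
-- the converted fragments with its replacement (alternative decomposition, same cost).

-- ===== PORT A =====
def convPlain (rule : String) : String :=
  rule.toList.foldl (fun reExpr c =>
    if c = '^' then reExpr ++ "([/:?=&]|//)"
    else if c = '*' then reExpr ++ ".*"
    else if c = '.' then reExpr ++ "\\."
    else if c = '?' then reExpr ++ "\\?"
    else if c = '+' then reExpr ++ "\\+"
    else if c = '[' then reExpr ++ "\\["
    else if c = '|' then reExpr ++ "\\|"
    else reExpr ++ String.ofList [c]) ""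

-- ===== PORT B =====
-- the SPECIALS constant of Source B
def pvSpecials : List (Char × String) :=
  [('^', "([/:?=&]|//)"), ('*', ".*"), ('.', "\\."),
   ('?', "\\?"), ('+', "\\+"), ('[', "\\["), ('|', "\\|")]

-- go(s, specials): repl.join(go(part, rest) for part in s.split(ch))
def pvGo : List (Char × String) → List Char → List Char
  | [], s => s
  | (ch, repl) :: rest, s =>
      PySem.Chars.join repl.toList ((PySem.Chars.splitOn s [ch]).map (pvGo rest))

def convPlain_alt (rule : String) : String := String.ofList (pvGo pvSpecials rule.toList)

-- ===== PRECONDITION & SPEC =====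
def Spec_convPlain (rule : String) (out : String) : Prop := out = convPlain_alt rule
instance (rule : String) (out : String) : Decidable (Spec_convPlain rule out) := by unfold Spec_convPlain; infer_instance

-- ===== CLAIM (what is proved, stated in full; the proofs are below) =====
def Claim_equal_convPlain : Prop := ∀ (rule : String), Dom_convPlain rule → Spec_convPlain rule (convPlain rule)

-- ===== LEMMAS AND PROOFS =====

-- proof-side characterisation of splitting on a single character:
-- (first fragment, remaining fragments)
def pvSplit (c : Char) : List Char → List Char × List (List Char)
  | [] => ([], [])
  | x :: t =>
      let (p, ps) := pvSplit c t
      if x = c then ([], p :: ps) else (x :: p, ps)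

-- proof-side per-character translation determined by a specials list
def pvTr : List (Char × String) → Char → List Char
  | [], c => [c]
  | (ch, r) :: rest, c => if c = ch then r.toList else pvTr rest c

theorem splitOn_go_single (c : Char) (fuel : Nat) :
    ∀ (l cur : List Char) (acc : List (List Char)), l.length ≤ fuel →
    PySem.Chars.splitOn.go [c] fuel l cur acc
      = acc.reverse ++ ((cur.reverse ++ (pvSplit c l).1) :: (pvSplit c l).2) := by
  induction fuel with
  | zero =>
    intro l cur acc hf
    have : l = [] := List.eq_nil_of_length_eq_zero (Nat.le_zero.mp hf)
    subst this
    simp [PySem.Chars.splitOn.go, pvSplit]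
  | succ n ih =>
    intro l cur acc hf
    cases l with
    | nil => simp [PySem.Chars.splitOn.go, pvSplit]
    | cons x t =>
      by_cases hx : x = c
      · subst hx
        have h1 : [x].isPrefixOf (x :: t) = true := by
          simp [List.isPrefixOf]
        have hd : List.drop [x].length (x :: t) = t := by simp
        simp only [PySem.Chars.splitOn.go, h1, if_true]
        rw [hd, ih t [] (cur.reverse :: acc) (by simpa using Nat.lt_succ_iff.mp (by simpa using hf))]
        simp [pvSplit]
      · have h1 : [c].isPrefixOf (x :: t) = false := by
          simp [List.isPrefixOf]
          exact fun h => hx h.symm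
        simp only [PySem.Chars.splitOn.go, h1]
        rw [ih t (x :: cur) acc (by simpa using Nat.lt_succ_iff.mp (by simpa using hf))]
        simp [pvSplit, hx]

theorem splitOn_single (c : Char) (l : List Char) :
    PySem.Chars.splitOn l [c] = (pvSplit c l).1 :: (pvSplit c l).2 := by
  unfold PySem.Chars.splitOn
  rw [splitOn_go_single c (l.length + 1) l [] [] (by omega)]
  simp

theorem join_cons_cons' (sep x y : List Char) (ys : List (List Char)) :
    PySem.Chars.join sep (x :: y :: ys) = x ++ sep ++ PySem.Chars.join sep (y :: ys) := by
  simp [PySem.Chars.join, List.intercalate]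

theorem join_cons_append (r a b : List Char) (rest : List (List Char)) :
    PySem.Chars.join r ((a ++ b) :: rest) = a ++ PySem.Chars.join r (b :: rest) := by
  cases rest with
  | nil => simp
  | cons y ys => simp [join_cons_cons', List.append_assoc]

theorem join_split (c : Char) (r : List Char) (f : Char → List Char) :
    ∀ l : List Char,
    PySem.Chars.join r (((pvSplit c l).1 :: (pvSplit c l).2).map (fun p => p.flatMap f))
      = l.flatMap (fun x => if x = c then r else f x) := by
  intro l
  induction l with
  | nil => simp [pvSplit]
  | cons x t ih =>
    by_cases hx : x = c
    · subst hx
      simp only [pvSplit, if_true]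
      simp only [List.map_cons, List.flatMap_nil] at ih ⊢
      rw [join_cons_cons']
      simp only [List.nil_append, List.flatMap_cons, if_true]
      rw [ih]
    · simp only [pvSplit, if_neg hx]
      simp only [List.map_cons, List.flatMap_cons] at ih ⊢
      rw [join_cons_append, ih]
      simp [hx]

theorem pvGo_flatMap : ∀ (sp : List (Char × String)) (l : List Char),
    pvGo sp l = l.flatMap (pvTr sp) := by
  intro sp
  induction sp with
  | nil => intro l; simp [pvGo, pvTr]
  | cons p rest ih =>
    intro l
    obtain ⟨ch, r⟩ := p
    simp only [pvGo]
    rw [splitOn_single]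
    have hmap : ((pvSplit ch l).1 :: (pvSplit ch l).2).map (pvGo rest)
        = ((pvSplit ch l).1 :: (pvSplit ch l).2).map (fun p => p.flatMap (pvTr rest)) := by
      apply List.map_congr_left
      intro a _
      exact ih a
    rw [hmap, join_split]
    simp [pvTr]

theorem convPlain_foldl (l : List Char) (s : String) :
    l.foldl (fun reExpr c =>
      if c = '^' then reExpr ++ "([/:?=&]|//)"
      else if c = '*' then reExpr ++ ".*"
      else if c = '.' then reExpr ++ "\\."
      else if c = '?' then reExpr ++ "\\?"
      else if c = '+' then reExpr ++ "\\+"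
      else if c = '[' then reExpr ++ "\\["
      else if c = '|' then reExpr ++ "\\|"
      else reExpr ++ String.ofList [c]) s
    = s ++ String.ofList (l.flatMap (pvTr pvSpecials)) := by
  induction l generalizing s with
  | nil => simp
  | cons c t ih =>
    have hstep :
        (if c = '^' then s ++ "([/:?=&]|//)"
         else if c = '*' then s ++ ".*"
         else if c = '.' then s ++ "\\."
         else if c = '?' then s ++ "\\?"
         else if c = '+' then s ++ "\\+"
         else if c = '[' then s ++ "\\["
         else if c = '|' then s ++ "\\|"
         else s ++ String.ofList [c]) = s ++ String.ofList (pvTr pvSpecials c) := by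
      simp only [pvSpecials, pvTr]
      split_ifs <;> simp
    simp only [List.foldl_cons]
    rw [hstep, ih]
    simp [String.append_assoc]

-- ===== VERDICT (by name: the statement is the Claim_ definition above) =====
theorem convPlain_spec : Claim_equal_convPlain := by
  intro rule _
  unfold Spec_convPlain convPlain convPlain_alt
  rw [convPlain_foldl, pvGo_flatMap]
  simp
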